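-- pv_equiv track=rewrite | github.com/rishabhc9/CharEncoding-Python-Library | __init__.py | encode_chuck_norris
-- ===== SOURCE A (Python) =====
-- def encode_chuck_norris(string):
--
--     binary_string = ''.join(format(ord(char), '08b') for char in string)
--
--     # Encode the binary string using Chuck Norris Unary code
--     encoded_string = ''
--     prev_bit = ''
--     for bit in binary_string:
--         if bit == '0':
--             if prev_bit != '0':
--                 encoded_string += '00 0'
--             else:
--                 encoded_string += '0'
--         else:
--             if prev_bit != '1':
--                 encoded_string += '00 0'
--             else:
--                 encoded_string += '0'
--             encoded_string += '0'
--         prev_bit = bit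
--
--     return encoded_string
-- ===== SOURCE B (Python) =====
-- def encode_chuck_norris(string):
--     binary_string = ''.join(format(ord(char), '08b') for char in string)
--
--     # Collect maximal runs of equal bits as (bit, run length) pairs.
--     runs = []
--     i = 0
--     n = len(binary_string)
--     while i < n:
--         j = i
--         while j < n and binary_string[j] == binary_string[i]:
--             j += 1
--         runs.append((binary_string[i], j - i))
--         i = j
--
--     # One block per run: '00 ' marker + k zeros for a zero-run, 2k zeros for a one-run.
--     blocks = []
--     for bit, k in runs:
--         zeros = k if bit == '0' else 2 * k
--         blocks.append('00 ' + '0' * zeros)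
--     return ''.join(blocks)
-- ===== Notes on version B (the rewrite author's own statement) =====
-- stated objective: alternative
-- what changed: A's per-bit state machine (tracking prev_bit and appending a marker or a single zero per bit) is replaced by a run-length decomposition: collect the maximal runs of equal bits, then emit one block per run (the two-zeros-plus-space marker followed by k zeros for a zero-run, 2k zeros for a one-run) and join the blocks.
import Mathlib
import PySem

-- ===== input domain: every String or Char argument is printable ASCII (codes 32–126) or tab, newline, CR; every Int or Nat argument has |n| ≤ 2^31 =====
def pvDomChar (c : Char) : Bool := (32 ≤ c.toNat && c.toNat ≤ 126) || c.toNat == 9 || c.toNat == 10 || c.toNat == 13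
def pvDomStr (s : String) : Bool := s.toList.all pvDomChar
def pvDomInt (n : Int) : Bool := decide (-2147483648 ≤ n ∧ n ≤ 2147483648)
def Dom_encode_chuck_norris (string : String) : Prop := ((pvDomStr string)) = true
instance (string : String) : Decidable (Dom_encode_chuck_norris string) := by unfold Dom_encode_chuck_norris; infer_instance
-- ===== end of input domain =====

-- B replaces A's per-bit state machine by a run-length decomposition: collect maximal runs of
-- equal bits, then emit one block '00 ' + k (or 2k) zeros per run (objective: alternative).


-- binary_string = ''.join(format(ord(char), '08b') for char in string) — identical line in A and B
def pvBinary (string : String) : List Char :=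
  string.toList.flatMap (fun c => PySem.Chars.zfill (PySem.Int.toBinChars (c.toNat : Int)) 8)

-- ===== PORT A =====
-- the body of A's for-loop: state = (encoded_string, prev_bit); prev_bit '' is []
def pvStepA (st : List Char × List Char) (bit : Char) : List Char × List Char :=
  if bit = '0' then
    (if st.2 ≠ ['0'] then st.1 ++ ['0', '0', ' ', '0'] else st.1 ++ ['0'], [bit])
  else
    ((if st.2 ≠ ['1'] then st.1 ++ ['0', '0', ' ', '0'] else st.1 ++ ['0']) ++ ['0'], [bit])

def encode_chuck_norris (string : String) : String :=
  let binary_string := pvBinary string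
  let final := binary_string.foldl pvStepA ([], [])
  String.ofList final.1

-- ===== PORT B =====
-- the two nested while loops of Source B: split off the maximal leading run, recurse on the rest
def pvRuns (bits : List Char) : List (Char × Nat) :=
  match bits with
  | [] => []
  | b :: rest => (b, 1 + (rest.takeWhile (· == b)).length) :: pvRuns (rest.dropWhile (· == b))
termination_by bits.length
decreasing_by simp only [List.length_cons]; exact Nat.lt_succ_of_le (List.length_dropWhile_le _ _)

-- one block per run: '00 ' + '0' * zeros
def pvBlock (bk : Char × Nat) : List Char :=
  '0' :: '0' :: ' ' :: List.replicate (if bk.1 = '0' then bk.2 else 2 * bk.2) '0'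

def encode_chuck_norris_alt (string : String) : String :=
  let binary_string := pvBinary string
  let runs := pvRuns binary_string
  let blocks := runs.map pvBlock
  String.ofList (PySem.Chars.join [] blocks)

-- ===== PRECONDITION & SPEC =====
def Spec_encode_chuck_norris (string : String) (out : String) : Prop := out = encode_chuck_norris_alt string
instance (string : String) (out : String) : Decidable (Spec_encode_chuck_norris string out) := by unfold Spec_encode_chuck_norris; infer_instance

-- ===== CLAIM (what is proved, stated in full; the proofs are below) =====
def Claim_equal_encode_chuck_norris : Prop := ∀ (string : String), Dom_encode_chuck_norris string → Spec_encode_chuck_norris string (encode_chuck_norris string)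

-- ===== LEMMAS AND PROOFS =====

-- every char of Nat.toDigits 2 (hence of the binary string) is '0' or '1'
lemma pv_tdc_mem : ∀ (fuel n : Nat) (acc : List Char), (∀ c ∈ acc, c = '0' ∨ c = '1') →
    ∀ c ∈ Nat.toDigitsCore 2 fuel n acc, c = '0' ∨ c = '1' := by
  intro fuel
  induction fuel with
  | zero => intro n acc hacc c hc; simp [Nat.toDigitsCore] at hc; exact hacc c hc
  | succ f ih =>
    intro n acc hacc c hc
    unfold Nat.toDigitsCore at hc
    have hacc' : ∀ c ∈ Nat.digitChar (n % 2) :: acc, c = '0' ∨ c = '1' := by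
      intro c hc
      rcases List.mem_cons.mp hc with h | h
      · rcases Nat.mod_two_eq_zero_or_one n with h2 | h2 <;> simp [h2, Nat.digitChar] at h <;> simp [h]
      · exact hacc c h
    by_cases hn : n / 2 = 0
    · simp [hn] at hc; exact hacc' c (List.mem_cons.mpr hc)
    · simp [hn] at hc; exact ih (n / 2) _ hacc' c hc

lemma pv_bin_mem (n : Int) (h : 0 ≤ n) :
    ∀ c ∈ PySem.Chars.zfill (PySem.Int.toBinChars n) 8, c = '0' ∨ c = '1' := by
  have hall : ∀ c ∈ Nat.toDigits 2 n.toNat, c = '0' ∨ c = '1' := by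
    intro c hc; simp only [Nat.toDigits] at hc; exact pv_tdc_mem _ _ [] (by simp) c hc
  intro c hc
  simp only [PySem.Int.toBinChars, if_neg (by omega : ¬ n < 0)] at hc
  unfold PySem.Chars.zfill at hc
  split at hc
  · exact hall c hc
  · rcases hn : Nat.toDigits 2 n.toNat with _ | ⟨d, rest⟩
    · simp [hn] at hc; exact Or.inl hc
    · have hd : d = '0' ∨ d = '1' := hall d (hn ▸ List.mem_cons_self ..)
      simp only [hn] at hc
      split at hc
      · rcases hd with h1 | h1 <;> simp [h1] at *
      · rcases List.mem_append.mp hc with h2 | h2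
        · exact Or.inl (List.eq_of_mem_replicate h2)
        · exact hall c (hn ▸ h2)

lemma pv_mem_binary (s : String) : ∀ c ∈ pvBinary s, c = '0' ∨ c = '1' := by
  intro c hc
  rcases List.mem_flatMap.mp hc with ⟨ch, _, hm⟩
  exact pv_bin_mem _ (by positivity) c hm

lemma pvRuns_cons (b : Char) (rest : List Char) :
    pvRuns (b :: rest) = (b, 1 + (rest.takeWhile (· == b)).length) :: pvRuns (rest.dropWhile (· == b)) := by
  rw [pvRuns]
def pvPiece (b : Char) (prev : List Char) : List Char :=
  if b = '0' then (if prev ≠ ['0'] then ['0', '0', ' ', '0'] else ['0'])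
  else (if prev ≠ ['1'] then ['0', '0', ' ', '0'] else ['0']) ++ ['0']
def pvEnc : List Char → List Char → List Char
  | [], _ => []
  | b :: rest, prev => pvPiece b prev ++ pvEnc rest [b]
def pvCont (c : Char) (k : Nat) : List Char :=
  List.replicate (if c = '0' then k else 2 * k) '0'
def pvJ (l : List (Char × Nat)) : List Char := (l.map pvBlock).flatten
def pvHead : List (Char × Nat) → List Char → List Char
  | [], _ => []
  | (c, k) :: more, prev => (if prev = [c] then pvCont c k else pvBlock (c, k)) ++ pvJ more

lemma pvEnc_cons (b : Char) (rest prev : List Char) :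
    pvEnc (b :: rest) prev = pvPiece b prev ++ pvEnc rest [b] := rfl
lemma pvHead_cons (c : Char) (k : Nat) (more : List (Char × Nat)) (prev : List Char) :
    pvHead ((c, k) :: more) prev = (if prev = [c] then pvCont c k else pvBlock (c, k)) ++ pvJ more := rfl
lemma pvJ_cons (p : Char × Nat) (l : List (Char × Nat)) : pvJ (p :: l) = pvBlock p ++ pvJ l := by
  simp [pvJ]

lemma pv_piece0 (prev : List Char) (k : Nat) :
    pvPiece '0' prev ++ pvCont '0' k = (if prev = ['0'] then pvCont '0' (1 + k) else pvBlock ('0', 1 + k)) := by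
  by_cases hp : prev = ['0'] <;>
    simp [pvPiece, pvCont, pvBlock, hp, Nat.add_comm 1 k, List.replicate_succ]

lemma pv_piece1 (prev : List Char) (k : Nat) :
    pvPiece '1' prev ++ pvCont '1' k = (if prev = ['1'] then pvCont '1' (1 + k) else pvBlock ('1', 1 + k)) := by
  have h2 : 2 * (1 + k) = 2 * k + 1 + 1 := by ring
  by_cases hp : prev = ['1'] <;>
    simp [pvPiece, pvCont, pvBlock, hp, h2, List.replicate_succ]

lemma pv_key (bits : List Char) : ∀ prev, (∀ c ∈ bits, c = '0' ∨ c = '1') →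
    pvEnc bits prev = pvHead (pvRuns bits) prev := by
  induction bits with
  | nil => intro prev _; simp [pvEnc, pvRuns, pvHead]
  | cons b rest ih =>
    intro prev hmem
    have hb : b = '0' ∨ b = '1' := hmem b (List.mem_cons_self ..)
    cases rest with
    | nil =>
      rw [pvRuns_cons]
      simp only [List.takeWhile_nil, List.length_nil, List.dropWhile_nil, pvRuns]
      rw [pvEnc_cons, pvHead_cons]
      have hz : pvEnc [] [b] = [] := rfl
      rw [hz, List.append_nil]
      rcases hb with hb | hb <;> subst hb
      · by_cases hp : prev = ['0'] <;> simp [pvPiece, pvCont, pvJ, pvBlock, hp, List.replicate_succ]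
      · by_cases hp : prev = ['1'] <;> simp [pvPiece, pvCont, pvJ, pvBlock, hp, List.replicate_succ]
    | cons c r =>
      have hrest : pvEnc (c :: r) [b] = pvHead (pvRuns (c :: r)) [b] :=
        ih [b] (fun x hx => hmem x (List.mem_cons_of_mem _ hx))
      have hc : c = '0' ∨ c = '1' := hmem c (by simp)
      rw [pvRuns_cons (b := c), pvHead_cons] at hrest
      rcases hb with hb | hb <;> rcases hc with hc | hc <;> subst hb <;> subst hc
      · -- b = '0', c = '0' : the run continues
        rw [if_pos rfl] at hrest
        rw [pvRuns_cons]
        have hlen : (List.takeWhile (· == '0') ('0' :: r)).length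
            = 1 + (List.takeWhile (· == '0') r).length := by
          simp [Nat.add_comm]
        have hdw : List.dropWhile (· == '0') ('0' :: r) = List.dropWhile (· == '0') r := by simp
        rw [hlen, hdw, pvEnc_cons, hrest, pvHead_cons, ← List.append_assoc,
          pv_piece0 prev (1 + (List.takeWhile (· == '0') r).length)]
      · -- b = '0', c = '1' : a new run starts
        rw [if_neg (by decide)] at hrest
        rw [pvRuns_cons]
        have htw : List.takeWhile (· == '0') ('1' :: r) = [] := by simp
        have hdw : List.dropWhile (· == '0') ('1' :: r) = '1' :: r := by simp
        rw [htw, hdw, pvRuns_cons (b := '1'), pvEnc_cons, hrest, pvHead_cons, pvJ_cons,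
          ← List.append_assoc, ← List.append_assoc]
        simp only [pvCont, pvBlock]
        by_cases hp : prev = ['0'] <;> simp [pvPiece, hp]
      · -- b = '1', c = '0'
        rw [if_neg (by decide)] at hrest
        rw [pvRuns_cons]
        have htw : List.takeWhile (· == '1') ('0' :: r) = [] := by simp
        have hdw : List.dropWhile (· == '1') ('0' :: r) = '0' :: r := by simp
        rw [htw, hdw, pvRuns_cons (b := '0'), pvEnc_cons, hrest, pvHead_cons, pvJ_cons,
          ← List.append_assoc, ← List.append_assoc]
        simp only [pvCont, pvBlock]
        by_cases hp : prev = ['1'] <;> simp [pvPiece, hp]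
      · -- b = '1', c = '1' : the run continues
        rw [if_pos rfl] at hrest
        rw [pvRuns_cons]
        have hlen : (List.takeWhile (· == '1') ('1' :: r)).length
            = 1 + (List.takeWhile (· == '1') r).length := by
          simp [Nat.add_comm]
        have hdw : List.dropWhile (· == '1') ('1' :: r) = List.dropWhile (· == '1') r := by simp
        rw [hlen, hdw, pvEnc_cons, hrest, pvHead_cons, ← List.append_assoc,
          pv_piece1 prev (1 + (List.takeWhile (· == '1') r).length)]

lemma pv_foldl_enc (bits : List Char) : ∀ enc prev,
    (bits.foldl pvStepA (enc, prev)).1 = enc ++ pvEnc bits prev := by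
  induction bits with
  | nil => intro enc prev; simp [pvEnc]
  | cons b rest ih =>
    intro enc prev
    by_cases hb : b = '0' <;> by_cases h0 : prev = ['0'] <;> by_cases h1 : prev = ['1'] <;>
      simp [pvStepA, pvEnc, pvPiece, hb, h0, h1, ih]

lemma pv_join_eq_flatten (bs : List (List Char)) : PySem.Chars.join [] bs = bs.flatten := by
  induction bs with
  | nil => simp [PySem.Chars.join, List.intercalate]
  | cons a bs ih =>
    cases bs with
    | nil => simp [PySem.Chars.join, List.intercalate]
    | cons b bs => rw [PySem.Chars.join_cons_cons, List.flatten_cons]; simp [ih]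

-- ===== VERDICT (by name: the statement is the Claim_ definition above) =====
theorem encode_chuck_norris_spec : Claim_equal_encode_chuck_norris := by
  intro s _
  unfold Spec_encode_chuck_norris
  show String.ofList (List.foldl pvStepA ([], []) (pvBinary s)).1 =
    String.ofList (PySem.Chars.join [] ((pvRuns (pvBinary s)).map pvBlock))
  rw [pv_foldl_enc, pv_key (pvBinary s) [] (pv_mem_binary s), pv_join_eq_flatten]
  cases h : pvRuns (pvBinary s) with
  | nil => simp [pvHead]
  | cons p more => cases p with
    | mk c k => simp [pvHead, pvJ]
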